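-- pv_equiv track=rewrite | github.com/nourmabdelhamed-cmd/RecruitAgent | src/tata/modules/report/candidate.py | anonymize_name
-- ===== SOURCE A (Python) =====
-- def anonymize_name(full_name: str) -> str:
--     """Convert full name to initials per Requirement 8.7.
--
--     Args:
--         full_name: The candidate's full name
--
--     Returns:
--         2-3 character initials (e.g., "John Smith" -> "JS")
--     """
--     if not full_name or not full_name.strip():
--         return "XX"
--
--     # Split name into parts
--     parts = full_name.strip().split()
--
--     # Take first letter of each part (up to 3)
--     initials = "".join(part[0].upper() for part in parts[:3] if part)
--
--     # Ensure at least 2 characters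
--     if len(initials) < 2:
--         initials = initials + "X" if initials else "XX"
--
--     return initials
-- ===== SOURCE B (Python) =====
-- def anonymize_name(full_name: str) -> str:
--     # single left-to-right scan: collect first char of each word, up to 3
--     initials = []
--     prev_space = True
--     for c in full_name:
--         if c.isspace():
--             prev_space = True
--         else:
--             if prev_space:
--                 initials.append(c.upper())
--                 if len(initials) == 3:
--                     break
--             prev_space = False
--     if not initials:
--         return "XX"
--     if len(initials) == 1:
--         return initials[0] + "X"
--     return "".join(initials)
-- ===== Notes on version B (the rewrite author's own statement) =====
-- stated objective: alternative
-- what changed: Replaces strip+split+join-comprehension with a single character scan that tracks a previous-was-whitespace flag, collects word-initial chars uppercased and breaks after three.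
import Mathlib
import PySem

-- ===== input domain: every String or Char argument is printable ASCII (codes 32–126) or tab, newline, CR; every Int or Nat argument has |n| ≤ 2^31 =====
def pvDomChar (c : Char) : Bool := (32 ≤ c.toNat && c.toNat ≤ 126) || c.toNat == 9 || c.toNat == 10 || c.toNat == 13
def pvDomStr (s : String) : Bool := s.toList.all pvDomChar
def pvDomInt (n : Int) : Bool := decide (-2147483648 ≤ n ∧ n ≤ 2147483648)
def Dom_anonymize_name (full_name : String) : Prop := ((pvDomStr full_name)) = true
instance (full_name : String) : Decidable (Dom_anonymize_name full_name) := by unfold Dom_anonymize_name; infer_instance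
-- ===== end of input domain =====

-- B replaces strip+split+join with a single scan keeping a prev-was-whitespace flag; same O(n) cost.
-- ===== PORT A =====
def anonymize_name (full_name : String) : String :=
  let cs := full_name.toList
  if cs.isEmpty || (PySem.Chars.strip cs).isEmpty then "XX"
  else
    let parts := PySem.Chars.split₀ (PySem.Chars.strip cs)
    -- "".join(part[0].upper() for part in parts[:3] if part)
    let initials := (parts.take 3).foldl
      (fun acc p => if !p.isEmpty then acc ++ [PySem.Chars.upperChar (p.headD ' ')] else acc) []
    let initials :=
      if initials.length < 2 then
        (if !initials.isEmpty then initials ++ ['X'] else ['X', 'X'])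
      else initials
    String.ofList initials

-- ===== PORT B =====
-- scan: prev = "previous char was whitespace (or start)"; break once 3 initials collected
def pvAltLoop : List Char → List Char → Bool → List Char
  | [], acc, _ => acc
  | c :: rest, acc, prev =>
    if PySem.Chars.isspace c then pvAltLoop rest acc true
    else if prev then
      let acc' := acc ++ [PySem.Chars.upperChar c]
      if acc'.length = 3 then acc' else pvAltLoop rest acc' false
    else pvAltLoop rest acc false

def anonymize_name_alt (full_name : String) : String :=
  match pvAltLoop full_name.toList [] true with
  | [] => "XX"
  | [a] => String.ofList [a, 'X']
  | l => String.ofList l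

-- ===== PRECONDITION & SPEC =====
def Spec_anonymize_name (full_name : String) (out : String) : Prop := out = anonymize_name_alt full_name
instance (full_name : String) (out : String) : Decidable (Spec_anonymize_name full_name out) := by unfold Spec_anonymize_name; infer_instance

-- ===== CLAIM (what is proved, stated in full; the proofs are below) =====
def Claim_equal_anonymize_name : Prop := ∀ (full_name : String), Dom_anonymize_name full_name → Spec_anonymize_name full_name (anonymize_name full_name)

-- ===== LEMMAS AND PROOFS =====

lemma go_word (s : List Char) : ∀ (cur : List Char) (acc : List (List Char)), cur ≠ [] →
    PySem.Chars.split₀.go s cur acc =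
      PySem.Chars.split₀.go (s.dropWhile (fun c => !PySem.Chars.isspace c)) []
        ((cur.reverse ++ s.takeWhile (fun c => !PySem.Chars.isspace c)) :: acc) := by
  induction s with
  | nil => intro cur acc h; simp [PySem.Chars.split₀.go, List.isEmpty_iff, h]
  | cons c rest ih =>
    intro cur acc h
    by_cases hs : PySem.Chars.isspace c = true
    · simp [PySem.Chars.split₀.go, hs, List.isEmpty_iff, h]
    · simp only [PySem.Chars.split₀.go, hs, Bool.false_eq_true, if_false,
        List.dropWhile_cons, List.takeWhile_cons, Bool.not_eq_eq_eq_not, Bool.not_false, if_true]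
      rw [ih (c :: cur) acc (by simp)]
      simp

lemma go_acc (s : List Char) : ∀ (cur : List Char) (acc : List (List Char)),
    PySem.Chars.split₀.go s cur acc = acc.reverse ++ PySem.Chars.split₀.go s cur [] := by
  induction s with
  | nil => intro cur acc; by_cases h : cur.isEmpty <;> simp [PySem.Chars.split₀.go, h]
  | cons c rest ih =>
    intro cur acc
    by_cases hs : PySem.Chars.isspace c = true
    · by_cases hc : cur.isEmpty = true
      · simp only [PySem.Chars.split₀.go, hs, hc, if_true]
        exact ih [] acc
      · simp only [PySem.Chars.split₀.go, hs, if_true, hc, Bool.false_eq_true, if_false]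
        rw [ih [] (cur.reverse :: acc), ih [] [cur.reverse]]
        simp
    · simp only [PySem.Chars.split₀.go, hs, Bool.false_eq_true, if_false]
      exact ih _ _

-- split₀ on a space head
lemma split₀_cons_space {c : Char} (hs : PySem.Chars.isspace c = true) (rest : List Char) :
    PySem.Chars.split₀ (c :: rest) = PySem.Chars.split₀ rest := by
  simp [PySem.Chars.split₀, PySem.Chars.split₀.go, hs]

-- split₀ on a non-space head: first word peeled off
lemma split₀_cons_word {c : Char} (hs : ¬ PySem.Chars.isspace c = true) (rest : List Char) :
    PySem.Chars.split₀ (c :: rest) =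
      (c :: rest.takeWhile (fun c => !PySem.Chars.isspace c)) ::
        PySem.Chars.split₀ (rest.dropWhile (fun c => !PySem.Chars.isspace c)) := by
  simp only [PySem.Chars.split₀, PySem.Chars.split₀.go, hs, Bool.false_eq_true, if_false]
  rw [go_word rest [c] [] (by simp), go_acc]
  simp

-- trailing whitespace is ignored by go
lemma go_space_only (w : List Char) (hw : ∀ c ∈ w, PySem.Chars.isspace c = true) :
    ∀ (cur : List Char) (acc : List (List Char)),
    PySem.Chars.split₀.go w cur acc = PySem.Chars.split₀.go [] cur acc := by
  induction w with
  | nil => intro cur acc; rfl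
  | cons c rest ih =>
    intro cur acc
    have hc := hw c (by simp)
    have hrest : ∀ c ∈ rest, PySem.Chars.isspace c = true := fun c h => hw c (by simp [h])
    by_cases hcur : cur.isEmpty = true
    · simp_all [PySem.Chars.split₀.go, hc, hcur, ih hrest]
    · simp only [PySem.Chars.split₀.go, hc, if_true, hcur, Bool.false_eq_true, if_false]
      rw [ih hrest [] (cur.reverse :: acc)]
      simp [PySem.Chars.split₀.go, hcur]

lemma go_append_space (s : List Char) (w : List Char) (hw : ∀ c ∈ w, PySem.Chars.isspace c = true) :
    ∀ (cur : List Char) (acc : List (List Char)),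
    PySem.Chars.split₀.go (s ++ w) cur acc = PySem.Chars.split₀.go s cur acc := by
  induction s with
  | nil =>
    intro cur acc
    exact go_space_only w hw cur acc
  | cons c rest ih =>
    intro cur acc
    by_cases hs : PySem.Chars.isspace c = true <;>
      by_cases hcur : cur.isEmpty = true <;>
        simp [PySem.Chars.split₀.go, hs, hcur, ih]

lemma split₀_lstrip (s : List Char) :
    PySem.Chars.split₀ (PySem.Chars.lstrip s) = PySem.Chars.split₀ s := by
  induction s with
  | nil => rfl
  | cons c rest ih =>
    by_cases hs : PySem.Chars.isspace c = true
    · rw [split₀_cons_space hs]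
      rw [← ih]
      simp [PySem.Chars.lstrip, List.dropWhile_cons, hs]
    · simp [PySem.Chars.lstrip, List.dropWhile_cons, hs]

lemma split₀_rstrip (s : List Char) :
    PySem.Chars.split₀ (PySem.Chars.rstrip s) = PySem.Chars.split₀ s := by
  have hdecomp : PySem.Chars.rstrip s ++ (s.reverse.takeWhile PySem.Chars.isspace).reverse = s := by
    simp only [PySem.Chars.rstrip]
    rw [← List.reverse_append, List.takeWhile_append_dropWhile, List.reverse_reverse]
  conv_rhs => rw [← hdecomp]
  simp only [PySem.Chars.split₀]
  rw [go_append_space _ _ (by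
    intro c hc
    simp only [List.mem_reverse] at hc
    exact List.mem_takeWhile_imp hc)]

lemma split₀_strip (s : List Char) :
    PySem.Chars.split₀ (PySem.Chars.strip s) = PySem.Chars.split₀ s := by
  simp [PySem.Chars.strip, split₀_rstrip, split₀_lstrip]

lemma split₀_eq_nil_all_space (s : List Char) (h : PySem.Chars.split₀ s = []) :
    ∀ c ∈ s, PySem.Chars.isspace c = true := by
  induction s with
  | nil => simp
  | cons c rest ih =>
    by_cases hs : PySem.Chars.isspace c = true
    · rw [split₀_cons_space hs] at h
      intro x hx
      rcases List.mem_cons.mp hx with rfl | hx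
      · exact hs
      · exact ih h x hx
    · rw [split₀_cons_word hs] at h
      simp at h

lemma strip_eq_nil_of_all_space (s : List Char) (h : ∀ c ∈ s, PySem.Chars.isspace c = true) :
    PySem.Chars.strip s = [] := by
  have h1 : PySem.Chars.lstrip s = [] := by
    simp [PySem.Chars.lstrip, List.dropWhile_eq_nil_iff]
    intro a ha; exact h a ha
  simp [PySem.Chars.strip, h1, PySem.Chars.rstrip]

lemma split₀_words_ne_nil_fuel : ∀ (n : Nat) (s : List Char), s.length ≤ n →
    ∀ p ∈ PySem.Chars.split₀ s, p ≠ [] := by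
  intro n
  induction n with
  | zero =>
    intro s hlen
    have : s = [] := List.eq_nil_of_length_eq_zero (Nat.le_zero.mp hlen)
    subst this
    simp [PySem.Chars.split₀, PySem.Chars.split₀.go]
  | succ n ih =>
    intro s hlen
    match s with
    | [] => simp [PySem.Chars.split₀, PySem.Chars.split₀.go]
    | c :: rest =>
      by_cases hs : PySem.Chars.isspace c = true
      · rw [split₀_cons_space hs]
        exact ih rest (by simpa using Nat.le_of_succ_le_succ (by simpa using hlen))
      · rw [split₀_cons_word hs]
        intro p hp
        rcases List.mem_cons.mp hp with rfl | hp
        · simp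
        · exact ih _ (le_trans (List.length_dropWhile_le _ _)
            (by simpa using Nat.le_of_succ_le_succ (by simpa using hlen))) p hp

lemma split₀_words_ne_nil (s : List Char) : ∀ p ∈ PySem.Chars.split₀ s, p ≠ [] :=
  split₀_words_ne_nil_fuel s.length s le_rfl

lemma pvAltLoop_false (s : List Char) : ∀ (acc : List Char),
    pvAltLoop s acc false =
      pvAltLoop (s.dropWhile (fun c => !PySem.Chars.isspace c)) acc true := by
  induction s with
  | nil => intro acc; rfl
  | cons c rest ih =>
    intro acc
    by_cases hs : PySem.Chars.isspace c = true
    · simp [pvAltLoop, hs, List.dropWhile_cons]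
    · simp [pvAltLoop, hs, List.dropWhile_cons, ih]

lemma pvAltLoop_eq : ∀ (n : Nat) (s acc : List Char), s.length ≤ n → acc.length < 3 →
    pvAltLoop s acc true =
      acc ++ ((PySem.Chars.split₀ s).take (3 - acc.length)).map
        (fun p => PySem.Chars.upperChar (p.headD ' ')) := by
  intro n
  induction n with
  | zero =>
    intro s acc hlen _
    have : s = [] := List.eq_nil_of_length_eq_zero (Nat.le_zero.mp hlen)
    subst this
    simp [pvAltLoop, PySem.Chars.split₀, PySem.Chars.split₀.go]
  | succ n ih =>
    intro s acc hlen hacc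
    match s with
    | [] => simp [pvAltLoop, PySem.Chars.split₀, PySem.Chars.split₀.go]
    | c :: rest =>
      by_cases hs : PySem.Chars.isspace c = true
      · rw [split₀_cons_space hs]
        simp only [pvAltLoop, hs, if_true]
        exact ih rest acc (by simpa using Nat.le_of_succ_le_succ (by simpa using hlen)) hacc
      · rw [split₀_cons_word hs]
        simp only [pvAltLoop, hs, Bool.false_eq_true, if_false, if_true]
        by_cases h3 : (acc ++ [PySem.Chars.upperChar c]).length = 3
        · simp only [h3, if_true]
          have hacc2 : acc.length = 2 := by simp at h3; omega
          have : 3 - acc.length = 1 := by omega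
          simp [this, hacc2]
        · simp only [h3, if_false]
          rw [pvAltLoop_false]
          rw [ih (rest.dropWhile (fun c => !PySem.Chars.isspace c)) (acc ++ [PySem.Chars.upperChar c])
            (le_trans (List.length_dropWhile_le _ _) (by simpa using Nat.le_of_succ_le_succ (by simpa using hlen)))
            (by simp at h3 ⊢; omega)]
          have htake : 3 - acc.length = (3 - (acc ++ [PySem.Chars.upperChar c]).length) + 1 := by
            simp; omega
          rw [htake, List.take_succ_cons]
          simp

lemma foldl_initials (l : List (List Char)) (h : ∀ p ∈ l, p ≠ []) : ∀ init : List Char,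
    l.foldl (fun acc p => if !p.isEmpty then acc ++ [PySem.Chars.upperChar (p.headD ' ')] else acc) init
      = init ++ l.map (fun p => PySem.Chars.upperChar (p.headD ' ')) := by
  induction l with
  | nil => simp
  | cons p rest ih =>
    intro init
    have hp : p ≠ [] := h p (by simp)
    rw [List.foldl_cons, if_pos (by simp [List.isEmpty_iff, hp]), ih (fun q hq => h q (by simp [hq]))]
    simp

lemma main_eq (s : String) : anonymize_name s = anonymize_name_alt s := by
  have hloop := pvAltLoop_eq s.toList.length s.toList [] le_rfl (by simp)
  simp only [List.length_nil, Nat.sub_zero, List.nil_append] at hloop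
  by_cases hstrip : PySem.Chars.strip s.toList = []
  · have hsplit : PySem.Chars.split₀ s.toList = [] := by
      rw [← split₀_strip, hstrip]; rfl
    rw [hsplit] at hloop
    simp only [anonymize_name, anonymize_name_alt, hstrip, hloop]
    simp
  · have hcs : s.toList ≠ [] := by
      intro h; apply hstrip; rw [h]; rfl
    have hsplitne : PySem.Chars.split₀ s.toList ≠ [] := by
      intro h
      exact hstrip (strip_eq_nil_of_all_space _ (split₀_eq_nil_all_space _ h))
    have hguard : (s.toList.isEmpty || (PySem.Chars.strip s.toList).isEmpty) = false := by
      simp [List.isEmpty_iff, hcs, hstrip]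
    simp only [anonymize_name, anonymize_name_alt, hguard, Bool.false_eq_true, if_false, hloop,
      foldl_initials _ (fun p hp => split₀_words_ne_nil _ p (List.mem_of_mem_take hp)) [],
      split₀_strip, List.nil_append]
    set I := ((PySem.Chars.split₀ s.toList).take 3).map (fun p => PySem.Chars.upperChar (p.headD ' ')) with hI
    have hIne : I ≠ [] := by
      simp only [hI, ne_eq, List.map_eq_nil_iff, List.take_eq_nil_iff]
      simpa using hsplitne
    match hm : I with
    | [] => exact absurd rfl hIne
    | [a] => simp
    | a :: b :: t =>
      rw [if_neg (by simp [List.length_cons])]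


-- ===== VERDICT (by name: the statement is the Claim_ definition above) =====
theorem anonymize_name_spec : Claim_equal_anonymize_name := by
  intro s _
  unfold Spec_anonymize_name
  exact main_eq s
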